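-- pv_equiv track=rewrite | github.com/Torehilbert/MasterThesis | Autoencoder/dsc_channel_select_DEV2.py | recursive_channel_selection
-- ===== SOURCE A (Python) =====
-- def recursive_channel_selection(chosen_chs, clusters):
--     if len(clusters)==1:
--         return [chosen_chs + [channel] for channel in clusters[0]]
--
--     combs = []
--     for i, channel in enumerate(clusters[0]):
--         subcombs = recursive_channel_selection(chosen_chs + [channel], clusters[1:])
--         combs.extend(subcombs)
--     return combs
-- ===== SOURCE B (Python) =====
-- def recursive_channel_selection(chosen_chs, clusters):
--     combs = [chosen_chs + [channel] for channel in clusters[0]]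
--     for cluster in clusters[1:]:
--         combs = [c + [channel] for c in combs for channel in cluster]
--     return combs
-- ===== Notes on version B (the rewrite author's own statement) =====
-- stated objective: simpler
-- what changed: Replaces the recursion over clusters (each level list-slicing clusters[1:] and extending an accumulator) with an iterative left-to-right product build that grows one flat list of combinations per cluster.
import Mathlib
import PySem

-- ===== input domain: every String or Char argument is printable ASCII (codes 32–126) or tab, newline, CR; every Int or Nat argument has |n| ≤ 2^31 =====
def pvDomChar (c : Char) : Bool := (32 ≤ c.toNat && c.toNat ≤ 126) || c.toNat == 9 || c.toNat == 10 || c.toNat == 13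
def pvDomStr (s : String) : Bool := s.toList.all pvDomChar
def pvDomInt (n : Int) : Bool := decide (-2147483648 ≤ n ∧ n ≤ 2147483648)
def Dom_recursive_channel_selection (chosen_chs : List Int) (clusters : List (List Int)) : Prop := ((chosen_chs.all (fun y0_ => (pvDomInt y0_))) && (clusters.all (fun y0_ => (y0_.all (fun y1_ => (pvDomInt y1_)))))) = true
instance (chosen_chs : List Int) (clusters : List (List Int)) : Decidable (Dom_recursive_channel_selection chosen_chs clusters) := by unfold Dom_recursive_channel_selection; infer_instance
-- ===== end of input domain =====

-- B replaces A's recursion by an iterative product build (simpler decomposition), same values.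

-- ===== PORT A =====
-- A: if len(clusters)==1 return [chosen+[ch] for ch in clusters[0]];
-- else accumulate combs.extend(recursive(chosen+[ch], clusters[1:])) over clusters[0].
-- Python raises IndexError on clusters = [] (excluded by Pre_); the port returns [] there.
def recursive_channel_selection (chosen_chs : List Int) : List (List Int) → List (List Int)
  | [] => []
  | c0 :: rest =>
    if (c0 :: rest).length = 1 then
      c0.map (fun channel => chosen_chs ++ [channel])
    else
      c0.foldl (fun combs channel =>
        combs ++ recursive_channel_selection (chosen_chs ++ [channel]) rest) []

-- ===== PORT B =====
-- B: combs = [chosen+[ch] for ch in clusters[0]]; for each later cluster,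
-- combs = [c + [ch] for c in combs for ch in cluster].  clusters[0] raises on [] (outside Pre_).
def recursive_channel_selection_alt (chosen_chs : List Int) (clusters : List (List Int)) : List (List Int) :=
  match clusters with
  | [] => []
  | c0 :: rest =>
    rest.foldl (fun combs cluster =>
      combs.flatMap (fun c => cluster.map (fun channel => c ++ [channel])))
      (c0.map (fun channel => chosen_chs ++ [channel]))

-- ===== PRECONDITION & SPEC =====
-- Both Pythons raise IndexError (clusters[0]) when clusters is empty; Pre_ excludes exactly that.
def Pre_recursive_channel_selection (chosen_chs : List Int) (clusters : List (List Int)) : Prop := clusters ≠ []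
instance (chosen_chs : List Int) (clusters : List (List Int)) : Decidable (Pre_recursive_channel_selection chosen_chs clusters) := by unfold Pre_recursive_channel_selection; infer_instance
def pvWitness_recursive_channel_selection : List Int × List (List Int) := ([7], [[1, 2], [3]])

def Spec_recursive_channel_selection (chosen_chs : List Int) (clusters : List (List Int)) (out : List (List Int)) : Prop := out = recursive_channel_selection_alt chosen_chs clusters
instance (chosen_chs : List Int) (clusters : List (List Int)) (out : List (List Int)) : Decidable (Spec_recursive_channel_selection chosen_chs clusters out) := by unfold Spec_recursive_channel_selection; infer_instance

-- ===== CLAIM (what is proved, stated in full; the proofs are below) =====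
def Claim_equal_recursive_channel_selection : Prop := ∀ (chosen_chs : List Int) (clusters : List (List Int)), Dom_recursive_channel_selection chosen_chs clusters → Pre_recursive_channel_selection chosen_chs clusters → Spec_recursive_channel_selection chosen_chs clusters (recursive_channel_selection chosen_chs clusters)

-- ===== LEMMAS AND PROOFS =====

-- B's loop step and its fold, named for the proofs
def pvStep (combs : List (List Int)) (cluster : List Int) : List (List Int) :=
  combs.flatMap (fun c => cluster.map (fun channel => c ++ [channel]))

def pvProd (rest : List (List Int)) (init : List (List Int)) : List (List Int) :=
  rest.foldl pvStep init

theorem pvProd_nil_init : ∀ (rest : List (List Int)), pvProd rest [] = [] := by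
  intro rest
  induction rest with
  | nil => rfl
  | cons r rs ih => simpa [pvProd, pvStep, List.foldl] using ih

theorem pvProd_append (rest : List (List Int)) :
    ∀ (x y : List (List Int)), pvProd rest (x ++ y) = pvProd rest x ++ pvProd rest y := by
  induction rest with
  | nil => intro x y; rfl
  | cons r rs ih =>
    intro x y
    simpa [pvProd, pvStep, List.foldl, List.flatMap_append] using ih _ _

theorem pvProd_flatMap (rest : List (List Int)) (l : List Int)
    (g : Int → List (List Int)) :
    pvProd rest (l.flatMap g) = l.flatMap (fun ch => pvProd rest (g ch)) := by
  induction l with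
  | nil => simpa using pvProd_nil_init rest
  | cons a t ih =>
    simp only [List.flatMap_cons]
    rw [pvProd_append]
    simp [ih]

theorem pvA_eq_prod : ∀ (rest : List (List Int)) (chosen_chs : List Int) (c0 : List Int),
    recursive_channel_selection chosen_chs (c0 :: rest)
      = pvProd rest (c0.map (fun channel => chosen_chs ++ [channel])) := by
  intro rest
  induction rest with
  | nil => intro chosen c0; simp [recursive_channel_selection, pvProd]
  | cons r rs ih =>
    intro chosen c0
    have hA : recursive_channel_selection chosen (c0 :: r :: rs)
        = c0.flatMap (fun ch => recursive_channel_selection (chosen ++ [ch]) (r :: rs)) := by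
      simp [recursive_channel_selection, List.flatMap_def]
    rw [hA]
    have : (fun ch => recursive_channel_selection (chosen ++ [ch]) (r :: rs))
        = fun ch => pvProd rs (r.map (fun channel => (chosen ++ [ch]) ++ [channel])) := by
      funext ch; exact ih (chosen ++ [ch]) r
    rw [this]
    have hR : pvProd (r :: rs) (c0.map (fun channel => chosen ++ [channel]))
        = pvProd rs (c0.flatMap (fun ch => r.map (fun channel => (chosen ++ [ch]) ++ [channel]))) := by
      simp [pvProd, pvStep, List.foldl, List.flatMap_map]
    rw [hR, pvProd_flatMap]

-- ===== VERDICT (by name: the statement is the Claim_ definition above) =====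
theorem recursive_channel_selection_spec : Claim_equal_recursive_channel_selection := by
  intro chosen clusters _ hpre
  unfold Spec_recursive_channel_selection
  match clusters with
  | [] => exact absurd rfl hpre
  | c0 :: rest =>
    rw [pvA_eq_prod]
    rfl
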